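-- pv_equiv track=rewrite | github.com/gargarnav/chomp-4xn | verify.py | tabulate_3xn
-- ===== SOURCE A (Python) =====
-- def moves_3xn(a, b, c):
--     for col in range(c):
--         yield (a, b, col)
--     for col in range(b):
--         yield (a, col, min(c, col))
--     for col in range(1, a):
--         yield (col, min(b, col), min(c, col))
--
-- def tabulate_3xn(max_n):
--     p = {(1, 0, 0)}
--     for a in range(1, max_n + 1):
--         for b in range(a + 1):
--             for c in range(b + 1):
--                 state = (a, b, c)
--                 if state == (1, 0, 0):
--                     continue
--                 if not any(m in p for m in moves_3xn(a, b, c)):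
--                     p.add(state)
--     return p
-- ===== SOURCE B (Python) =====
-- def tabulate_3xn(max_n):
--     # P-positions found so far; (1,0,0) is the terminal P-position.
--     p = {(1, 0, 0)}
--     # global indexes over p (entries with first coordinate < current a):
--     cmin = None          # min x with (x,x,x) in p
--     gmin = {}            # gmin[c] = min x with (x,x,c) in p, x > c
--     hset = {(0, 0)}      # pairs (b,c) such that some (x,b,c) in p with x > b
--     for a in range(1, max_n + 1):
--         # indexes over entries (a,*,*) of p found during this a-scan:
--         dmin = 0 if a == 1 else None   # min x with (a,x,x) in p  ((1,0,0) when a==1)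
--         oset = set()                   # c-values with some (a,x,c) in p, x > c
--         for b in range(a + 1):
--             row = False                # any (a,b,col) in p with col < current c
--             for c in range(b + 1):
--                 if (a, b, c) == (1, 0, 0):
--                     continue
--                 losing_move = (
--                     row
--                     or (dmin is not None and dmin <= c)
--                     or (c in oset)
--                     or (cmin is not None and cmin <= c)
--                     or (gmin.get(c, a + 1) <= b)
--                     or ((b, c) in hset)
--                 )
--                 if not losing_move:
--                     p.add((a, b, c))
--                     row = True
--                     if b == c:
--                         if dmin is None or b < dmin:
--                             dmin = b
--                     else:
--                         oset.add(c)
--                     if a == b == c: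
--                         if cmin is None or a < cmin:
--                             cmin = a
--                     elif a == b:
--                         if c not in gmin or a < gmin[c]:
--                             gmin[c] = a
--                     else:
--                         hset.add((b, c))
--     return p
-- ===== Notes on version B (the rewrite author's own statement) =====
-- stated objective: faster
-- what changed: Instead of scanning all O(n) moves of every state against the set p, B maintains incremental indexes over the P-positions found so far (running minima of diagonal entries, key sets/min-dicts of off-diagonal entries) so each state's losing-move test is O(1) dictionary/set lookups.
import Mathlib
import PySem

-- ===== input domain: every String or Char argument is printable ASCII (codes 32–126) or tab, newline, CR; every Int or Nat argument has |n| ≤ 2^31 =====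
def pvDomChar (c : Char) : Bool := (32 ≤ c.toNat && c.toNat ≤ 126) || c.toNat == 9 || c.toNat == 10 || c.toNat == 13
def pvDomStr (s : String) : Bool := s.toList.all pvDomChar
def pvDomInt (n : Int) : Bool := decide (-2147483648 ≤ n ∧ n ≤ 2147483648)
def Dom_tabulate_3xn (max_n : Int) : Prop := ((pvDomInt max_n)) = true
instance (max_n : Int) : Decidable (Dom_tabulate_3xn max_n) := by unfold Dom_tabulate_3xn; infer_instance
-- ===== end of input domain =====

-- B replaces A's O(n)-long scan of all moves of each state by O(1) lookups in
-- incrementally maintained indexes (minima of diagonal P-positions, key sets of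
-- off-diagonal ones), an asymptotically faster tabulation of the same set.

-- ===== PORT A =====
-- generator moves_3xn(a, b, c), materialised in yield order
def moves_3xn (a b c : Int) : List (List Int) :=
  (PySem.List.pyRange 0 c 1).map (fun col => [a, b, col])
  ++ (PySem.List.pyRange 0 b 1).map (fun col => [a, col, min c col])
  ++ (PySem.List.pyRange 1 a 1).map (fun col => [col, min b col, min c col])

-- body of A's innermost loop (one state (a,b,c))
def chompStepA (a b c : Int) (p : List (List Int)) : List (List Int) :=
  if [a, b, c] = [(1 : Int), 0, 0] then p
  else if (moves_3xn a b c).any (fun m => PySem.Set.contains p m) then p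
  else PySem.Set.add p [a, b, c]

-- A's loop over c, then over b
def aBodyB (a : Int) (p : List (List Int)) (b : Int) : List (List Int) :=
  (PySem.List.pyRange 0 (b + 1) 1).foldl (fun p c => chompStepA a b c p) p

def aBodyA (p : List (List Int)) (a : Int) : List (List Int) :=
  (PySem.List.pyRange 0 (a + 1) 1).foldl (aBodyB a) p

def tabulate_3xn (max_n : Int) : List (List Int) :=
  (PySem.List.pyRange 1 (max_n + 1) 1).foldl aBodyA (PySem.Set.ofList [[1, 0, 0]])

-- ===== PORT B =====
-- the global state of Source B: the set p plus the global indexes cmin, gmin, hset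
structure ChompAux where
  p : PySem.Set (List Int)
  cmin : Option Int
  gmin : PySem.Dict Int Int
  hset : PySem.Set (Int × Int)
deriving Repr, DecidableEq

-- `m is not None and m <= c`
def leOpt (o : Option Int) (c : Int) : Bool :=
  match o with | some d => decide (d ≤ c) | none => false

-- running minimum update: `if m is None or w < m: m = w`
def minUpd (o : Option Int) (w : Int) : Option Int :=
  match o with | none => some w | some v => if w < v then some w else some v

-- body of B's innermost loop; state = (global aux, dmin, oset, row)
def altStep (a b : Int) (st : ChompAux × Option Int × PySem.Set Int × Bool) (c : Int) :
    ChompAux × Option Int × PySem.Set Int × Bool :=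
  if [a, b, c] = [(1 : Int), 0, 0] then st
  else
    let g := st.1
    let dmin := st.2.1
    let oset := st.2.2.1
    let row := st.2.2.2
    let losing : Bool :=
      row
      || leOpt dmin c
      || PySem.Set.contains oset c
      || leOpt g.cmin c
      || decide (PySem.Dict.getD g.gmin c (a + 1) ≤ b)
      || PySem.Set.contains g.hset (b, c)
    if losing then st
    else
      let p' := PySem.Set.add g.p [a, b, c]
      let dmin' := if b = c then minUpd dmin b else dmin
      let oset' := if b = c then oset else PySem.Set.add oset c
      let cmin' := if a = b ∧ b = c then minUpd g.cmin a else g.cmin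
      let gmin' := if a = b ∧ ¬ b = c then
          (if PySem.Dict.contains g.gmin c = false then PySem.Dict.insert g.gmin c a
           else if a < PySem.Dict.getD g.gmin c 0 then PySem.Dict.insert g.gmin c a
           else g.gmin)
        else g.gmin
      let hset' := if ¬ a = b then PySem.Set.add g.hset (b, c) else g.hset
      (⟨p', cmin', gmin', hset'⟩, dmin', oset', true)

-- B's loop over c (threading dmin, oset through; row is reset per b), then over b
def bBodyB (a : Int) (st : ChompAux × Option Int × PySem.Set Int) (b : Int) :
    ChompAux × Option Int × PySem.Set Int :=
  let r := (PySem.List.pyRange 0 (b + 1) 1).foldl (altStep a b) (st.1, st.2.1, st.2.2, false)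
  (r.1, r.2.1, r.2.2.1)

def bBodyA (g : ChompAux) (a : Int) : ChompAux :=
  ((PySem.List.pyRange 0 (a + 1) 1).foldl (bBodyB a)
    (g, (if a = 1 then (some 0 : Option Int) else none), (PySem.Set.empty : PySem.Set Int))).1

def tabulate_3xn_alt (max_n : Int) : List (List Int) :=
  ((PySem.List.pyRange 1 (max_n + 1) 1).foldl bBodyA
    (⟨PySem.Set.ofList [[1, 0, 0]], none, PySem.Dict.empty,
      PySem.Set.ofList [((0 : Int), (0 : Int))]⟩ : ChompAux)).p

-- ===== PRECONDITION & SPEC =====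
def Spec_tabulate_3xn (max_n : Int) (out : List (List Int)) : Prop := out = tabulate_3xn_alt max_n
instance (max_n : Int) (out : List (List Int)) : Decidable (Spec_tabulate_3xn max_n out) := by unfold Spec_tabulate_3xn; infer_instance

-- ===== CLAIM (what is proved, stated in full; the proofs are below) =====
def Claim_equal_tabulate_3xn : Prop := ∀ (max_n : Int), Dom_tabulate_3xn max_n → Spec_tabulate_3xn max_n (tabulate_3xn max_n)

-- ===== LEMMAS AND PROOFS =====

-- (a,b,c) strictly before (a',b',c') in A's scan order
def ltPos (x y z a b c : Int) : Prop := x < a ∨ (x = a ∧ (y < b ∨ (y = b ∧ z < c)))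

-- every member of p is a legal staircase state already scanned (or the seed (1,0,0))
def ContentAt (a b c : Int) (p : List (List Int)) : Prop :=
  ∀ s ∈ p, ∃ x y z, s = [x, y, z] ∧ 1 ≤ x ∧ 0 ≤ z ∧ z ≤ y ∧ y ≤ x ∧
    (ltPos x y z a b c ∨ (x = 1 ∧ y = 0 ∧ z = 0))

-- o is the minimum of {x | Q x} (none = empty)
def MinSpec (o : Option Int) (Q : Int → Prop) : Prop :=
  (∀ v, o = some v → Q v ∧ ∀ x, Q x → v ≤ x) ∧ (o = none → ∀ x, ¬ Q x)

def GlobalInv (g : ChompAux) : Prop :=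
  MinSpec g.cmin (fun x => [x, x, x] ∈ g.p) ∧
  (∀ cc : Int, MinSpec (PySem.Dict.get? g.gmin cc) (fun x => cc < x ∧ [x, x, cc] ∈ g.p)) ∧
  (∀ bb cc : Int, ((bb, cc) ∈ g.hset ↔ ∃ x, bb < x ∧ [x, bb, cc] ∈ g.p))

def LocalInv (a : Int) (p : List (List Int)) (dmin : Option Int) (oset : PySem.Set Int) : Prop :=
  MinSpec dmin (fun x => [a, x, x] ∈ p) ∧
  (∀ cc : Int, (cc ∈ oset ↔ ∃ x, cc < x ∧ [a, x, cc] ∈ p))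

def RowInv (a b c : Int) (p : List (List Int)) (row : Bool) : Prop :=
  row = true ↔ ∃ z, z < c ∧ [a, b, z] ∈ p ∧ ¬ (a = 1 ∧ b = 0 ∧ z = 0)

theorem mem_triple (a b c : Int) (p : List (List Int)) (hC : ContentAt a b c p)
    (x y z : Int) (hm : [x, y, z] ∈ p) :
    1 ≤ x ∧ 0 ≤ z ∧ z ≤ y ∧ y ≤ x ∧ (ltPos x y z a b c ∨ (x = 1 ∧ y = 0 ∧ z = 0)) := by
  rcases hC _ hm with ⟨x', y', z', heq, h⟩
  simp only [List.cons.injEq, and_true] at heq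
  obtain ⟨rfl, rfl, rfl, -⟩ := heq
  exact h

theorem check_iff (a b c : Int) (p : List (List Int)) (cmin dmin : Option Int)
    (gmin : PySem.Dict Int Int) (hset : PySem.Set (Int × Int)) (oset : PySem.Set Int) (row : Bool)
    (ha : 1 ≤ a) (hc : 0 ≤ c) (hcb : c ≤ b) (hba : b ≤ a) (hne : ¬(a = 1 ∧ b = 0 ∧ c = 0))
    (hC : ContentAt a b c p)
    (hcm : MinSpec cmin (fun x => [x, x, x] ∈ p))
    (hgm : ∀ cc, MinSpec (PySem.Dict.get? gmin cc) (fun x => cc < x ∧ [x, x, cc] ∈ p))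
    (hhs : ∀ bb cc : Int, ((bb, cc) ∈ hset ↔ ∃ x, bb < x ∧ [x, bb, cc] ∈ p))
    (hdm : MinSpec dmin (fun x => [a, x, x] ∈ p))
    (hos : ∀ cc : Int, (cc ∈ oset ↔ ∃ x, cc < x ∧ [a, x, cc] ∈ p))
    (hrow : RowInv a b c p row) :
    ((∃ x, (0 ≤ x ∧ x < c) ∧ [a, b, x] ∈ p) ∨
     (∃ x, (0 ≤ x ∧ x < b) ∧ [a, x, min c x] ∈ p) ∨
     (∃ x, (1 ≤ x ∧ x < a) ∧ [x, min b x, min c x] ∈ p)) ↔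
    (row = true ∨ (∃ d, dmin = some d ∧ d ≤ c) ∨ c ∈ oset ∨
     (∃ v, cmin = some v ∧ v ≤ c) ∨ (PySem.Dict.getD gmin c (a + 1) ≤ b) ∨ (b, c) ∈ hset) := by
  constructor
  · rintro (⟨col, ⟨h0, h1⟩, hm⟩ | ⟨col, ⟨h0, h1⟩, hm⟩ | ⟨col, ⟨h0, h1⟩, hm⟩)
    · exact Or.inl (hrow.mpr ⟨col, h1, hm, by omega⟩)
    · by_cases hcl : col ≤ c
      · rw [min_eq_right hcl] at hm
        rcases hdup : dmin with _ | d
        · exact absurd hm (hdm.2 hdup col)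
        · exact Or.inr (Or.inl ⟨d, rfl, le_trans ((hdm.1 d hdup).2 col hm) hcl⟩)
      · rw [min_eq_left (by omega : c ≤ col)] at hm
        exact Or.inr (Or.inr (Or.inl ((hos c).mpr ⟨col, by omega, hm⟩)))
    · by_cases hcl : col ≤ c
      · rw [min_eq_right (le_trans hcl hcb), min_eq_right hcl] at hm
        rcases hdup : cmin with _ | v
        · exact absurd hm (hcm.2 hdup col)
        · exact Or.inr (Or.inr (Or.inr (Or.inl ⟨v, rfl, le_trans ((hcm.1 v hdup).2 col hm) hcl⟩)))
      · by_cases hcb2 : col ≤ b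
        · rw [min_eq_right hcb2, min_eq_left (by omega : c ≤ col)] at hm
          rcases hget : PySem.Dict.get? gmin c with _ | v
          · exact absurd ⟨by omega, hm⟩ ((hgm c).2 hget col)
          · refine Or.inr (Or.inr (Or.inr (Or.inr (Or.inl ?_))))
            rw [PySem.Dict.getD_eq_get?_getD, hget]
            exact le_trans (((hgm c).1 v hget).2 col ⟨by omega, hm⟩) hcb2
        · rw [min_eq_left (by omega : b ≤ col), min_eq_left (by omega : c ≤ col)] at hm
          exact Or.inr (Or.inr (Or.inr (Or.inr (Or.inr ((hhs b c).mpr ⟨col, by omega, hm⟩)))))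
  · rintro (hr | ⟨d, hdup, hdc⟩ | ho | ⟨v, hvup, hvc⟩ | hg | hh)
    · obtain ⟨z, hz, hm, -⟩ := hrow.mp hr
      have hb := mem_triple a b c p hC a b z hm
      exact Or.inl ⟨z, ⟨by omega, hz⟩, hm⟩
    · have hQ := (hdm.1 d hdup).1
      have hb := mem_triple a b c p hC a d d hQ
      have hdb : d < b := by
        rcases hb.2.2.2.2 with hlt | hesc
        · rcases hlt with h | ⟨-, h | ⟨h1, h2⟩⟩ <;> omega
        · omega
      refine Or.inr (Or.inl ⟨d, ⟨by omega, hdb⟩, ?_⟩)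
      rwa [min_eq_right (by omega : d ≤ c)]
    · obtain ⟨x, hcx, hm⟩ := (hos c).mp ho
      have hb := mem_triple a b c p hC a x c hm
      have hxb : x < b := by
        rcases hb.2.2.2.2 with hlt | hesc
        · rcases hlt with h | ⟨-, h | ⟨h1, h2⟩⟩ <;> omega
        · omega
      refine Or.inr (Or.inl ⟨x, ⟨by omega, hxb⟩, ?_⟩)
      rwa [min_eq_left (by omega : c ≤ x)]
    · have hQ := (hcm.1 v hvup).1
      have hb := mem_triple a b c p hC v v v hQ
      have hva : v < a := by
        rcases hb.2.2.2.2 with hlt | hesc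
        · rcases hlt with h | ⟨h0, h | ⟨h1, h2⟩⟩ <;> omega
        · omega
      refine Or.inr (Or.inr ⟨v, ⟨by omega, hva⟩, ?_⟩)
      rw [min_eq_right (by omega : v ≤ b), min_eq_right (by omega : v ≤ c)]
      exact hQ
    · rcases hget : PySem.Dict.get? gmin c with _ | v
      · rw [PySem.Dict.getD_eq_get?_getD, hget] at hg
        simp at hg
        omega
      · rw [PySem.Dict.getD_eq_get?_getD, hget] at hg
        simp at hg
        obtain ⟨⟨hcv, hm⟩, -⟩ := (hgm c).1 v hget
        have hb := mem_triple a b c p hC v v c hm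
        have hva : v < a := by
          rcases hb.2.2.2.2 with hlt | hesc
          · rcases hlt with h | ⟨h0, h | ⟨h1, h2⟩⟩ <;> omega
          · omega
        refine Or.inr (Or.inr ⟨v, ⟨by omega, hva⟩, ?_⟩)
        rw [min_eq_right (by omega : v ≤ b), min_eq_left (by omega : c ≤ v)]
        exact hm
    · obtain ⟨x, hbx, hm⟩ := (hhs b c).mp hh
      have hb := mem_triple a b c p hC x b c hm
      have hxa : x < a := by
        rcases hb.2.2.2.2 with hlt | ⟨h1, h2, h3⟩
        · rcases hlt with h | ⟨h0, h | ⟨h4, h5⟩⟩ <;> omega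
        · omega
      refine Or.inr (Or.inr ⟨x, ⟨by omega, hxa⟩, ?_⟩)
      rw [min_eq_left (by omega : b ≤ x), min_eq_left (by omega : c ≤ x)]
      exact hm

theorem contentAt_mono (a b c c' : Int) (p : List (List Int)) (h : ContentAt a b c p)
    (hcc : c ≤ c') : ContentAt a b c' p := by
  intro s hs
  rcases h s hs with ⟨x, y, z, heq, h1, h2, h3, h4, h5⟩
  refine ⟨x, y, z, heq, h1, h2, h3, h4, ?_⟩
  rcases h5 with (h | ⟨h6, h7 | ⟨h8, h9⟩⟩) | h
  · exact Or.inl (Or.inl h)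
  · exact Or.inl (Or.inr ⟨h6, Or.inl h7⟩)
  · exact Or.inl (Or.inr ⟨h6, Or.inr ⟨h8, by omega⟩⟩)
  · exact Or.inr h

theorem rowinv_step (a b c : Int) (p : List (List Int)) (row : Bool)
    (hC : ContentAt a b c p) (hR : RowInv a b c p row) : RowInv a b (c + 1) p row := by
  rw [RowInv] at hR ⊢
  rw [hR]
  constructor
  · rintro ⟨z, hz, hm, hnz⟩; exact ⟨z, by omega, hm, hnz⟩
  · rintro ⟨z, hz, hm, hnz⟩
    refine ⟨z, ?_, hm, hnz⟩
    rcases (mem_triple a b c p hC a b z hm).2.2.2.2 with (h | ⟨-, h | ⟨-, h⟩⟩) | h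
    · omega
    · omega
    · omega
    · exact absurd h hnz

theorem minspec_congr (o : Option Int) (Q Q' : Int → Prop) (h : ∀ x, Q x ↔ Q' x)
    (hm : MinSpec o Q) : MinSpec o Q' := by
  constructor
  · intro v hv
    obtain ⟨h1, h2⟩ := hm.1 v hv
    exact ⟨(h v).mp h1, fun x hx => h2 x ((h x).mpr hx)⟩
  · intro hn x hx
    exact hm.2 hn x ((h x).mpr hx)

theorem minspec_update (o : Option Int) (Q Q' : Int → Prop) (w : Int)
    (hQ' : ∀ x, Q' x ↔ (Q x ∨ x = w)) (h : MinSpec o Q) :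
    MinSpec (minUpd o w) Q' := by
  rcases o with _ | v
  all_goals rw [minUpd]
  · refine ⟨?_, by simp⟩
    intro u hu
    simp only [Option.some.injEq] at hu
    subst hu
    refine ⟨(hQ' w).mpr (Or.inr rfl), ?_⟩
    intro x hx
    rcases (hQ' x).mp hx with hq | rfl
    · exact absurd hq (h.2 rfl x)
    · exact le_refl x
  · obtain ⟨hv1, hv2⟩ := h.1 v rfl
    by_cases hwv : w < v
    · simp only [if_pos hwv]
      refine ⟨?_, by simp⟩
      intro u hu
      simp only [Option.some.injEq] at hu
      subst hu
      refine ⟨(hQ' w).mpr (Or.inr rfl), ?_⟩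
      intro x hx
      rcases (hQ' x).mp hx with hq | rfl
      · exact le_trans (le_of_lt hwv) (hv2 x hq)
      · exact le_refl x
    · simp only [if_neg hwv]
      refine ⟨?_, by simp⟩
      intro u hu
      simp only [Option.some.injEq] at hu
      subst hu
      refine ⟨(hQ' v).mpr (Or.inl hv1), ?_⟩
      intro x hx
      rcases (hQ' x).mp hx with hq | rfl
      · exact hv2 x hq
      · omega


theorem memAdd {α : Type} [BEq α] [LawfulBEq α] (s : PySem.Set α) (x y : α) :
    y ∈ PySem.Set.add s x ↔ y ∈ s ∨ y = x := PySem.Set.mem_add s x y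

theorem contentAt_add (a b c : Int) (p : List (List Int))
    (ha : 1 ≤ a) (hc : 0 ≤ c) (hcb : c ≤ b) (hba : b ≤ a) (hC : ContentAt a b c p) :
    ContentAt a b (c + 1) (PySem.Set.add p [a, b, c]) := by
  intro s hs
  rw [memAdd] at hs
  rcases hs with hs | rfl
  · exact contentAt_mono a b c (c + 1) p hC (by omega) s hs
  · exact ⟨a, b, c, rfl, ha, hc, hcb, hba, Or.inl (Or.inr ⟨rfl, Or.inr ⟨rfl, by omega⟩⟩)⟩

theorem rowinv_add (a b c : Int) (p : List (List Int)) (hne : ¬(a = 1 ∧ b = 0 ∧ c = 0)) :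
    RowInv a b (c + 1) (PySem.Set.add p [a, b, c]) true := by
  rw [RowInv]
  constructor
  · intro _
    exact ⟨c, by omega, (memAdd _ _ _).mpr (Or.inr rfl), hne⟩
  · intro _; rfl

theorem dmin_add (a b c : Int) (p : List (List Int)) (dmin : Option Int)
    (h : MinSpec dmin (fun x => [a, x, x] ∈ p)) :
    MinSpec (if b = c then minUpd dmin b else dmin)
      (fun x => [a, x, x] ∈ PySem.Set.add p [a, b, c]) := by
  by_cases hbc : b = c
  · rw [if_pos hbc]
    subst hbc
    refine minspec_update dmin _ _ b ?_ h
    intro x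
    rw [memAdd]
    constructor
    · rintro (hx | hx)
      · exact Or.inl hx
      · simp only [List.cons.injEq, and_true] at hx; right; omega
    · rintro (hx | rfl)
      · exact Or.inl hx
      · exact Or.inr rfl
  · simp only [if_neg hbc]
    refine minspec_congr dmin _ _ ?_ h
    intro x
    rw [memAdd]
    constructor
    · exact fun hx => Or.inl hx
    · rintro (hx | hx)
      · exact hx
      · simp only [List.cons.injEq, and_true] at hx; omega

theorem cmin_add (a b c : Int) (p : List (List Int)) (cmin : Option Int)
    (h : MinSpec cmin (fun x => [x, x, x] ∈ p)) :
    MinSpec (if a = b ∧ b = c then minUpd cmin a else cmin)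
      (fun x => [x, x, x] ∈ PySem.Set.add p [a, b, c]) := by
  by_cases habc : a = b ∧ b = c
  · rw [if_pos habc]
    obtain ⟨rfl, rfl⟩ := habc
    refine minspec_update cmin _ _ a ?_ h
    intro x
    rw [memAdd]
    constructor
    · rintro (hx | hx)
      · exact Or.inl hx
      · simp only [List.cons.injEq, and_true] at hx; right; omega
    · rintro (hx | rfl)
      · exact Or.inl hx
      · exact Or.inr rfl
  · simp only [if_neg habc]
    refine minspec_congr cmin _ _ ?_ h
    intro x
    rw [memAdd]
    constructor
    · exact fun hx => Or.inl hx
    · rintro (hx | hx)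
      · exact hx
      · simp only [List.cons.injEq, and_true] at hx
        exact absurd ⟨by omega, by omega⟩ habc

theorem oset_add (a b c : Int) (p : List (List Int)) (oset : PySem.Set Int) (hcb : c ≤ b)
    (h : ∀ cc : Int, (cc ∈ oset ↔ ∃ x, cc < x ∧ [a, x, cc] ∈ p)) :
    ∀ cc : Int, (cc ∈ (if b = c then oset else PySem.Set.add oset c) ↔
      ∃ x, cc < x ∧ [a, x, cc] ∈ PySem.Set.add p [a, b, c]) := by
  intro cc
  by_cases hbc : b = c
  · rw [if_pos hbc, h cc]
    subst hbc
    constructor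
    · rintro ⟨x, hx, hm⟩; exact ⟨x, hx, (memAdd _ _ _).mpr (Or.inl hm)⟩
    · rintro ⟨x, hx, hm⟩
      rcases (memAdd _ _ _).mp hm with hm | hm
      · exact ⟨x, hx, hm⟩
      · simp only [List.cons.injEq, and_true] at hm; omega
  · rw [if_neg hbc, PySem.Set.mem_add]
    constructor
    · rintro (hcc | rfl)
      · obtain ⟨x, hx, hm⟩ := (h cc).mp hcc
        exact ⟨x, hx, (memAdd _ _ _).mpr (Or.inl hm)⟩
      · exact ⟨b, by omega, (memAdd _ _ _).mpr (Or.inr rfl)⟩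
    · rintro ⟨x, hx, hm⟩
      rcases (memAdd _ _ _).mp hm with hm | hm
      · exact Or.inl ((h cc).mpr ⟨x, hx, hm⟩)
      · simp only [List.cons.injEq, and_true] at hm; right; omega

theorem hset_add (a b c : Int) (p : List (List Int)) (hset : PySem.Set (Int × Int)) (hba : b ≤ a)
    (h : ∀ bb cc : Int, ((bb, cc) ∈ hset ↔ ∃ x, bb < x ∧ [x, bb, cc] ∈ p)) :
    ∀ bb cc : Int, ((bb, cc) ∈ (if ¬ a = b then PySem.Set.add hset (b, c) else hset) ↔
      ∃ x, bb < x ∧ [x, bb, cc] ∈ PySem.Set.add p [a, b, c]) := by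
  intro bb cc
  by_cases hab : a = b
  · rw [if_neg (by simp [hab]), h bb cc]
    subst hab
    constructor
    · rintro ⟨x, hx, hm⟩; exact ⟨x, hx, (memAdd _ _ _).mpr (Or.inl hm)⟩
    · rintro ⟨x, hx, hm⟩
      rcases (memAdd _ _ _).mp hm with hm | hm
      · exact ⟨x, hx, hm⟩
      · simp only [List.cons.injEq, and_true] at hm; omega
  · rw [if_pos hab, PySem.Set.mem_add]
    constructor
    · rintro (hcc | heq)
      · obtain ⟨x, hx, hm⟩ := (h bb cc).mp hcc
        exact ⟨x, hx, (memAdd _ _ _).mpr (Or.inl hm)⟩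
      · simp only [Prod.mk.injEq] at heq
        obtain ⟨rfl, rfl⟩ := heq
        exact ⟨a, by omega, (memAdd _ _ _).mpr (Or.inr rfl)⟩
    · rintro ⟨x, hx, hm⟩
      rcases (memAdd _ _ _).mp hm with hm | hm
      · exact Or.inl ((h bb cc).mpr ⟨x, hx, hm⟩)
      · simp only [List.cons.injEq, and_true] at hm
        right
        simp only [Prod.mk.injEq]
        omega

theorem gmin_add (a b c : Int) (p : List (List Int)) (gmin : PySem.Dict Int Int)
    (hc : 0 ≤ c) (hcb : c ≤ b) (hba : b ≤ a)
    (h : ∀ cc : Int, MinSpec (PySem.Dict.get? gmin cc) (fun x => cc < x ∧ [x, x, cc] ∈ p)) :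
    ∀ cc : Int, MinSpec (PySem.Dict.get?
      (if a = b ∧ ¬ b = c then
        (if PySem.Dict.contains gmin c = false then PySem.Dict.insert gmin c a
         else if a < PySem.Dict.getD gmin c 0 then PySem.Dict.insert gmin c a
         else gmin)
       else gmin) cc)
      (fun x => cc < x ∧ [x, x, cc] ∈ PySem.Set.add p [a, b, c]) := by
  intro cc
  by_cases hcond : a = b ∧ ¬ b = c
  · obtain ⟨rfl, hbc⟩ := hcond
    rw [if_pos ⟨rfl, hbc⟩]
    by_cases hcc : cc = c
    · subst hcc
      have hform : PySem.Dict.get?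
          (if PySem.Dict.contains gmin cc = false then PySem.Dict.insert gmin cc a
           else if a < PySem.Dict.getD gmin cc 0 then PySem.Dict.insert gmin cc a
           else gmin) cc
          = minUpd (PySem.Dict.get? gmin cc) a := by
        rcases hg : PySem.Dict.get? gmin cc with _ | v
        · have hcon : PySem.Dict.contains gmin cc = false := by
            rw [PySem.Dict.contains_eq_isSome_get?, hg]; rfl
          rw [if_pos hcon, PySem.Dict.get?_insert_self]
          rfl
        · have hcon : PySem.Dict.contains gmin cc = true := by
            rw [PySem.Dict.contains_eq_isSome_get?, hg]; rfl
          have hgd : PySem.Dict.getD gmin cc 0 = v := by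
            rw [PySem.Dict.getD_eq_get?_getD, hg]; rfl
          rw [if_neg (by simp [hcon]), hgd]
          simp only [minUpd]
          by_cases hav : a < v
          · rw [if_pos hav, if_pos hav, PySem.Dict.get?_insert_self]
          · rw [if_neg hav, if_neg hav, hg]
      rw [hform]
      refine minspec_update _ _ _ a ?_ (h cc)
      intro x
      rw [memAdd]
      constructor
      · rintro ⟨hx, hm | hm⟩
        · exact Or.inl ⟨hx, hm⟩
        · simp only [List.cons.injEq, and_true] at hm; right; omega
      · rintro (⟨hx, hm⟩ | rfl)
        · exact ⟨hx, Or.inl hm⟩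
        · exact ⟨by omega, Or.inr rfl⟩
    · have hget : PySem.Dict.get?
          (if PySem.Dict.contains gmin c = false then PySem.Dict.insert gmin c a
           else if a < PySem.Dict.getD gmin c 0 then PySem.Dict.insert gmin c a
           else gmin) cc = PySem.Dict.get? gmin cc := by
        by_cases h1 : PySem.Dict.contains gmin c = false
        · rw [if_pos h1, PySem.Dict.get?_insert_of_ne gmin a hcc]
        · rw [if_neg h1]
          by_cases h2 : a < PySem.Dict.getD gmin c 0
          · rw [if_pos h2, PySem.Dict.get?_insert_of_ne gmin a hcc]
          · rw [if_neg h2]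
      rw [hget]
      refine minspec_congr _ _ _ ?_ (h cc)
      intro x
      rw [memAdd]
      constructor
      · rintro ⟨hx, hm⟩; exact ⟨hx, Or.inl hm⟩
      · rintro ⟨hx, hm | hm⟩
        · exact ⟨hx, hm⟩
        · simp only [List.cons.injEq, and_true] at hm; omega
  · rw [if_neg hcond]
    refine minspec_congr _ _ _ ?_ (h cc)
    intro x
    rw [memAdd]
    constructor
    · rintro ⟨hx, hm⟩; exact ⟨hx, Or.inl hm⟩
    · rintro ⟨hx, hm | hm⟩
      · exact ⟨hx, hm⟩
      · simp only [List.cons.injEq, and_true] at hm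
        exact absurd ⟨by omega, by omega⟩ hcond


theorem any_moves_iff (a b c : Int) (p0 : PySem.Set (List Int)) :
    ((moves_3xn a b c).any (fun m => PySem.Set.contains p0 m) = true) ↔
      ((∃ x, (0 ≤ x ∧ x < c) ∧ [a, b, x] ∈ p0) ∨
       (∃ x, (0 ≤ x ∧ x < b) ∧ [a, x, min c x] ∈ p0) ∨
       (∃ x, (1 ≤ x ∧ x < a) ∧ [x, min b x, min c x] ∈ p0)) := by
  simp [moves_3xn, PySem.List.mem_pyRange_one]

theorem losing_bool_iff (a b c : Int) (dmin cm : Option Int) (oset : PySem.Set Int)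
    (gm : PySem.Dict Int Int) (hs : PySem.Set (Int × Int)) (row : Bool) :
    ((row || leOpt dmin c
       || PySem.Set.contains oset c
       || leOpt cm c
       || decide (PySem.Dict.getD gm c (a + 1) ≤ b)
       || PySem.Set.contains hs (b, c)) = true) ↔
      (row = true ∨ (∃ d, dmin = some d ∧ d ≤ c) ∨ c ∈ oset ∨
       (∃ v, cm = some v ∧ v ≤ c) ∨ (PySem.Dict.getD gm c (a + 1) ≤ b) ∨ (b, c) ∈ hs) := by
  cases dmin <;> cases cm <;> simp [leOpt] <;> tauto


theorem altStep_correct (a b c : Int) (g : ChompAux) (dmin : Option Int)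
    (oset : PySem.Set Int) (row : Bool)
    (ha : 1 ≤ a) (hc : 0 ≤ c) (hcb : c ≤ b) (hba : b ≤ a)
    (hC : ContentAt a b c g.p) (hG : GlobalInv g) (hL : LocalInv a g.p dmin oset)
    (hR : RowInv a b c g.p row) :
    (altStep a b (g, dmin, oset, row) c).1.p = chompStepA a b c g.p ∧
    ContentAt a b (c + 1) (altStep a b (g, dmin, oset, row) c).1.p ∧
    GlobalInv (altStep a b (g, dmin, oset, row) c).1 ∧
    LocalInv a (altStep a b (g, dmin, oset, row) c).1.p
      (altStep a b (g, dmin, oset, row) c).2.1 (altStep a b (g, dmin, oset, row) c).2.2.1 ∧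
    RowInv a b (c + 1) (altStep a b (g, dmin, oset, row) c).1.p
      (altStep a b (g, dmin, oset, row) c).2.2.2 := by
  obtain ⟨p0, cm, gm, hs⟩ := g
  simp only at hC hG hL hR ⊢
  by_cases hsk : [a, b, c] = [(1 : Int), 0, 0]
  · refine ⟨by simp [altStep, chompStepA, hsk], ?_, ?_, ?_, ?_⟩ <;>
      simp only [altStep, if_pos hsk]
    · exact contentAt_mono a b c (c + 1) p0 hC (by omega)
    · exact hG
    · exact hL
    · exact rowinv_step a b c p0 row hC hR
  · have hne : ¬(a = 1 ∧ b = 0 ∧ c = 0) := fun h => hsk (by rw [h.1, h.2.1, h.2.2])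
    have hbool : ((moves_3xn a b c).any (fun m => PySem.Set.contains p0 m))
        = (row || leOpt dmin c
           || PySem.Set.contains oset c
           || leOpt cm c
           || decide (PySem.Dict.getD gm c (a + 1) ≤ b)
           || PySem.Set.contains hs (b, c)) := by
      rw [Bool.eq_iff_iff]
      have hmain := check_iff a b c p0 cm dmin gm hs oset row ha hc hcb hba hne hC
        hG.1 hG.2.1 hG.2.2 hL.1 hL.2 hR
      exact (any_moves_iff a b c p0).trans
        (hmain.trans (losing_bool_iff a b c dmin cm oset gm hs row).symm)
    rcases hlos : (row || leOpt dmin c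
           || PySem.Set.contains oset c
           || leOpt cm c
           || decide (PySem.Dict.getD gm c (a + 1) ≤ b)
           || PySem.Set.contains hs (b, c)) with _ | _
    · -- not losing: the state is added on both sides
      have hA : chompStepA a b c p0 = PySem.Set.add p0 [a, b, c] := by
        rw [chompStepA, if_neg hsk, hbool, hlos]
        simp
      have hB : altStep a b (⟨p0, cm, gm, hs⟩, dmin, oset, row) c =
          (⟨PySem.Set.add p0 [a, b, c],
            (if a = b ∧ b = c then minUpd cm a else cm),
            (if a = b ∧ ¬ b = c then
              (if PySem.Dict.contains gm c = false then PySem.Dict.insert gm c a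
               else if a < PySem.Dict.getD gm c 0 then PySem.Dict.insert gm c a
               else gm)
             else gm),
            (if ¬ a = b then PySem.Set.add hs (b, c) else hs)⟩,
           (if b = c then minUpd dmin b else dmin),
           (if b = c then oset else PySem.Set.add oset c), true) := by
        rw [altStep, if_neg hsk]
        simp only [hlos]
        rfl
      rw [hA, hB]
      refine ⟨rfl, contentAt_add a b c p0 ha hc hcb hba hC, ?_, ?_, ?_⟩
      · exact ⟨cmin_add a b c p0 cm hG.1, gmin_add a b c p0 gm hc hcb hba hG.2.1,
          hset_add a b c p0 hs hba hG.2.2⟩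
      · exact ⟨dmin_add a b c p0 dmin hL.1, oset_add a b c p0 oset hcb hL.2⟩
      · exact rowinv_add a b c p0 hne
    · -- losing: both sides unchanged
      have hA : chompStepA a b c p0 = p0 := by
        rw [chompStepA, if_neg hsk, hbool, hlos]
        simp
      have hB : altStep a b (⟨p0, cm, gm, hs⟩, dmin, oset, row) c =
          (⟨p0, cm, gm, hs⟩, dmin, oset, row) := by
        rw [altStep, if_neg hsk]
        simp only [hlos]
        rfl
      rw [hA, hB]
      exact ⟨rfl, contentAt_mono a b c (c + 1) p0 hC (by omega), hG, hL,
        rowinv_step a b c p0 row hC hR⟩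

theorem rowinv_init (a b0 : Int) (p : List (List Int)) (hC : ContentAt a b0 0 p) :
    RowInv a b0 0 p false := by
  rw [RowInv]
  constructor
  · intro h; cases h
  · rintro ⟨z, hz, hm, -⟩
    have := (mem_triple a b0 0 p hC a b0 z hm).2.1
    omega

theorem contentAt_next_b (a b0 : Int) (p : List (List Int))
    (h : ContentAt a b0 (b0 + 1) p) : ContentAt a (b0 + 1) 0 p := by
  intro s hs
  rcases h s hs with ⟨x, y, z, heq, h1, h2, h3, h4, h5⟩
  refine ⟨x, y, z, heq, h1, h2, h3, h4, ?_⟩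
  rcases h5 with (h | ⟨h6, h7 | ⟨h8, h9⟩⟩) | h
  · exact Or.inl (Or.inl h)
  · exact Or.inl (Or.inr ⟨h6, Or.inl (by omega)⟩)
  · exact Or.inl (Or.inr ⟨h6, Or.inl (by omega)⟩)
  · exact Or.inr h

theorem contentAt_next_a (a : Int) (p : List (List Int))
    (h : ContentAt a (a + 1) 0 p) : ContentAt (a + 1) 0 0 p := by
  intro s hs
  rcases h s hs with ⟨x, y, z, heq, h1, h2, h3, h4, h5⟩
  refine ⟨x, y, z, heq, h1, h2, h3, h4, ?_⟩
  rcases h5 with (h | ⟨h6, h7 | ⟨h8, h9⟩⟩) | h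
  · exact Or.inl (Or.inl (by omega))
  · exact Or.inl (Or.inl (by omega))
  · exact Or.inl (Or.inl (by omega))
  · exact Or.inr h

theorem no_first_coord (a' : Int) (p : List (List Int)) (ha' : 2 ≤ a')
    (hC : ContentAt a' 0 0 p) (u v : Int) (hm : [a', u, v] ∈ p) : False := by
  have hb := mem_triple a' 0 0 p hC a' u v hm
  rcases hb.2.2.2.2 with (h | ⟨h6, h7 | ⟨h8, h9⟩⟩) | h <;> omega

theorem cloop (a b : Int) (ha : 1 ≤ a) (_hb0 : 0 ≤ b) (hba : b ≤ a) :
    ∀ (n : Nat) (c0 : Int) (g : ChompAux) (dmin : Option Int) (oset : PySem.Set Int) (row : Bool),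
    (b + 1 - c0).toNat = n → 0 ≤ c0 → c0 ≤ b + 1 →
    ContentAt a b c0 g.p → GlobalInv g → LocalInv a g.p dmin oset → RowInv a b c0 g.p row →
    (((PySem.List.pyRange c0 (b + 1) 1).foldl (altStep a b) (g, dmin, oset, row)).1.p =
      (PySem.List.pyRange c0 (b + 1) 1).foldl (fun p c => chompStepA a b c p) g.p) ∧
    ContentAt a b (b + 1)
      ((PySem.List.pyRange c0 (b + 1) 1).foldl (altStep a b) (g, dmin, oset, row)).1.p ∧
    GlobalInv ((PySem.List.pyRange c0 (b + 1) 1).foldl (altStep a b) (g, dmin, oset, row)).1 ∧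
    LocalInv a ((PySem.List.pyRange c0 (b + 1) 1).foldl (altStep a b) (g, dmin, oset, row)).1.p
      ((PySem.List.pyRange c0 (b + 1) 1).foldl (altStep a b) (g, dmin, oset, row)).2.1
      ((PySem.List.pyRange c0 (b + 1) 1).foldl (altStep a b) (g, dmin, oset, row)).2.2.1 := by
  intro n
  induction n with
  | zero =>
    intro c0 g dmin oset row hn h0 hub hC hG hL hR
    rw [PySem.List.pyRange_one_eq_nil (by omega : b + 1 ≤ c0)]
    simp only [List.foldl_nil]
    have hc0 : c0 = b + 1 := by omega
    exact ⟨by trivial, by rwa [hc0] at hC, hG, hL⟩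
  | succ k ih =>
    intro c0 g dmin oset row hn h0 hub hC hG hL hR
    have hlt : c0 < b + 1 := by omega
    rw [PySem.List.pyRange_one_cons hlt]
    simp only [List.foldl_cons]
    obtain ⟨heq, hC', hG', hL', hR'⟩ :=
      altStep_correct a b c0 g dmin oset row ha h0 (by omega) hba hC hG hL hR
    rcases hst : altStep a b (g, dmin, oset, row) c0 with ⟨g', dmin', oset', row'⟩
    rw [hst] at heq hC' hG' hL' hR'
    simp only at heq hC' hG' hL' hR'
    rw [← heq]
    exact ih (c0 + 1) g' dmin' oset' row' (by omega) (by omega) (by omega) hC' hG' hL' hR'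

theorem bloop (a : Int) (ha : 1 ≤ a) :
    ∀ (n : Nat) (b0 : Int) (g : ChompAux) (dmin : Option Int) (oset : PySem.Set Int),
    (a + 1 - b0).toNat = n → 0 ≤ b0 → b0 ≤ a + 1 →
    ContentAt a b0 0 g.p → GlobalInv g → LocalInv a g.p dmin oset →
    (((PySem.List.pyRange b0 (a + 1) 1).foldl (bBodyB a) (g, dmin, oset)).1.p =
      (PySem.List.pyRange b0 (a + 1) 1).foldl (aBodyB a) g.p) ∧
    ContentAt a (a + 1) 0 ((PySem.List.pyRange b0 (a + 1) 1).foldl (bBodyB a) (g, dmin, oset)).1.p ∧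
    GlobalInv ((PySem.List.pyRange b0 (a + 1) 1).foldl (bBodyB a) (g, dmin, oset)).1 := by
  intro n
  induction n with
  | zero =>
    intro b0 g dmin oset hn h0 hub hC hG hL
    rw [PySem.List.pyRange_one_eq_nil (by omega : a + 1 ≤ b0)]
    simp only [List.foldl_nil]
    have hb0 : b0 = a + 1 := by omega
    exact ⟨by trivial, by rwa [hb0] at hC, hG⟩
  | succ k ih =>
    intro b0 g dmin oset hn h0 hub hC hG hL
    have hlt : b0 < a + 1 := by omega
    rw [PySem.List.pyRange_one_cons hlt]
    simp only [List.foldl_cons]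
    obtain ⟨heq, hC', hG', hL'⟩ :=
      cloop a b0 ha h0 (by omega) ((b0 + 1 - 0).toNat) 0 g dmin oset false rfl le_rfl
        (by omega) hC hG hL (rowinv_init a b0 g.p hC)
    have hCb : ContentAt a (b0 + 1) 0
        ((PySem.List.pyRange 0 (b0 + 1) 1).foldl (altStep a b0) (g, dmin, oset, false)).1.p :=
      contentAt_next_b a b0 _ hC'
    rcases hst : (PySem.List.pyRange 0 (b0 + 1) 1).foldl (altStep a b0) (g, dmin, oset, false)
      with ⟨g', dmin', oset', row'⟩
    rw [hst] at heq hCb hG' hL'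
    simp only at heq hCb hG' hL'
    have hbB : bBodyB a (g, dmin, oset) b0 = (g', dmin', oset') := by
      simp only [bBodyB, hst]
    have hbA : aBodyB a g.p b0 = g'.p := by
      rw [aBodyB, ← heq]
    rw [hbB, hbA]
    exact ih (b0 + 1) g' dmin' oset' (by omega) (by omega) (by omega) hCb hG' hL'

theorem aloop :
    ∀ (n : Nat) (a0 N : Int) (g : ChompAux),
    (N + 1 - a0).toNat = n → 1 ≤ a0 →
    ContentAt a0 0 0 g.p → GlobalInv g →
    MinSpec (if a0 = 1 then (some 0 : Option Int) else none) (fun x => [a0, x, x] ∈ g.p) →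
    (∀ cc x : Int, ¬ (cc < x ∧ [a0, x, cc] ∈ g.p)) →
    ((PySem.List.pyRange a0 (N + 1) 1).foldl aBodyA g.p) =
      ((PySem.List.pyRange a0 (N + 1) 1).foldl bBodyA g).p := by
  intro n
  induction n with
  | zero =>
    intro a0 N g hn ha0 hC hG hdm hos
    rw [PySem.List.pyRange_one_eq_nil (by omega : N + 1 ≤ a0)]
    rfl
  | succ k ih =>
    intro a0 N g hn ha0 hC hG hdm hos
    have hlt : a0 < N + 1 := by omega
    rw [PySem.List.pyRange_one_cons hlt]
    simp only [List.foldl_cons]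
    have hL0 : LocalInv a0 g.p (if a0 = 1 then (some 0 : Option Int) else none) PySem.Set.empty := by
      refine ⟨hdm, ?_⟩
      intro cc
      constructor
      · intro h; cases h
      · rintro ⟨x, hx, hm⟩
        exact absurd ⟨hx, hm⟩ (hos cc x)
    obtain ⟨heq, hC', hG'⟩ :=
      bloop a0 ha0 ((a0 + 1 - 0).toNat) 0 g
        (if a0 = 1 then (some 0 : Option Int) else none) PySem.Set.empty rfl le_rfl
        (by omega) hC hG hL0
    have hCa : ContentAt (a0 + 1) 0 0
        ((PySem.List.pyRange 0 (a0 + 1) 1).foldl (bBodyB a0)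
          (g, (if a0 = 1 then (some 0 : Option Int) else none), PySem.Set.empty)).1.p :=
      contentAt_next_a a0 _ hC'
    rcases hst : (PySem.List.pyRange 0 (a0 + 1) 1).foldl (bBodyB a0)
        (g, (if a0 = 1 then (some 0 : Option Int) else none), PySem.Set.empty)
      with ⟨g', dmin', oset'⟩
    rw [hst] at heq hCa hG'
    simp only at heq hCa hG'
    have hbB : bBodyA g a0 = g' := by
      simp only [bBodyA, hst]
    have hbA : aBodyA g.p a0 = g'.p := by
      rw [aBodyA, ← heq]
    rw [hbB, hbA]
    have hnofc : ∀ u v : Int, [a0 + 1, u, v] ∈ g'.p → False :=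
      no_first_coord (a0 + 1) g'.p (by omega) hCa
    refine ih (a0 + 1) N g' (by omega) (by omega) hCa hG' ?_ ?_
    · rw [if_neg (by omega : ¬ a0 + 1 = 1)]
      exact ⟨fun v h => (nomatch h), fun _ x hx => hnofc x x hx⟩
    · rintro cc x ⟨hx, hm⟩
      exact hnofc x cc hm

-- ===== VERDICT (by name: the statement is the Claim_ definition above) =====
theorem tabulate_3xn_spec : Claim_equal_tabulate_3xn := by
  intro max_n _
  show tabulate_3xn max_n = tabulate_3xn_alt max_n
  rw [tabulate_3xn, tabulate_3xn_alt]
  have hmem : ∀ s : List Int, s ∈ PySem.Set.ofList [[(1 : Int), 0, 0]] ↔ s = [1, 0, 0] := by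
    intro s
    rw [PySem.Set.mem_ofList]
    simp
  have hC0 : ContentAt 1 0 0 (PySem.Set.ofList [[(1 : Int), 0, 0]]) := by
    intro s hs
    rw [hmem s] at hs
    exact ⟨1, 0, 0, hs, by omega, by omega, by omega, by omega, Or.inr ⟨rfl, rfl, rfl⟩⟩
  have hG0 : GlobalInv ⟨PySem.Set.ofList [[1, 0, 0]], none, PySem.Dict.empty,
      PySem.Set.ofList [((0 : Int), (0 : Int))]⟩ := by
    refine ⟨⟨fun v h => (nomatch h), fun _ x hx => ?_⟩, fun cc => ?_, fun bb cc => ?_⟩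
    · have hx' := (hmem [x, x, x]).mp hx
      simp only [List.cons.injEq, and_true] at hx'
      omega
    · rw [PySem.Dict.get?_empty]
      refine ⟨fun v h => (nomatch h), fun _ x hx => ?_⟩
      obtain ⟨h1, h2⟩ := hx
      have h2' := (hmem [x, x, cc]).mp h2
      simp only [List.cons.injEq, and_true] at h2'
      omega
    · constructor
      · intro h
        simp only [PySem.Set.mem_ofList, List.mem_singleton, Prod.mk.injEq] at h
        obtain ⟨rfl, rfl⟩ := h
        exact ⟨1, by omega, (hmem _).mpr rfl⟩
      · rintro ⟨x, hx, hm⟩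
        rw [hmem] at hm
        simp only [List.cons.injEq, and_true] at hm
        simp only [PySem.Set.mem_ofList, List.mem_singleton, Prod.mk.injEq]
        omega
  have hdm0 : MinSpec (if (1 : Int) = 1 then (some 0 : Option Int) else none)
      (fun x => [(1 : Int), x, x] ∈ PySem.Set.ofList [[(1 : Int), 0, 0]]) := by
    rw [if_pos rfl]
    refine ⟨fun v hv => ?_, fun h => nomatch h⟩
    have hv0 : v = 0 := by
      simpa using hv.symm
    subst hv0
    refine ⟨(hmem _).mpr rfl, fun x hx => ?_⟩
    have hx' := (hmem [1, x, x]).mp hx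
    simp only [List.cons.injEq, and_true] at hx'
    omega
  have hos0 : ∀ cc x : Int, ¬ (cc < x ∧ [(1 : Int), x, cc] ∈ PySem.Set.ofList [[(1 : Int), 0, 0]]) := by
    rintro cc x ⟨hx, hm⟩
    rw [hmem] at hm
    simp only [List.cons.injEq, and_true] at hm
    omega
  exact aloop ((max_n + 1 - 1).toNat) 1 max_n
    ⟨PySem.Set.ofList [[1, 0, 0]], none, PySem.Dict.empty,
      PySem.Set.ofList [((0 : Int), (0 : Int))]⟩ rfl le_rfl hC0 hG0 hdm0 hos0
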